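-- pv_equiv track=rewrite | github.com/gobelinor/CTF-destroyer | ctf_destroyer/writeups.py | _collect_commands
-- ===== SOURCE A (Python) =====
-- from typing import Any
--
-- def _collect_commands(history: Any, latest_output: Any, limit: int = 10) -> list[str]:
--     commands: list[str] = []
--     seen: set[str] = set()
--
--     if isinstance(latest_output, dict):
--         for command in list(latest_output.get("commands", [])):
--             compact = _compact_text(str(command), limit=320)
--             if compact and compact not in seen:
--                 seen.add(compact)
--                 commands.append(compact)
--                 if len(commands) >= limit:
--                     return commands
--
--     if isinstance(history, list):
--         for attempt in reversed(history):
--             if not isinstance(attempt, dict):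
--                 continue
--             for command in list(attempt.get("key_commands", [])):
--                 compact = _compact_text(str(command), limit=320)
--                 if compact and compact not in seen:
--                     seen.add(compact)
--                     commands.append(compact)
--                     if len(commands) >= limit:
--                         return commands
--     return commands
--
-- def _compact_text(value: str, limit: int = 320, preserve_newlines: bool = False) -> str:
--     normalized = value.strip()
--     if not normalized:
--         return ""
--     if preserve_newlines:
--         lines = [" ".join(line.split()) for line in normalized.splitlines()]
--         compact = "\n".join(line for line in lines if line)
--     else:
--         compact = " ".join(normalized.split())
--     if len(compact) <= limit:
--         return compact
--     return f"{compact[: limit - 3].rstrip()}..."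
-- ===== SOURCE B (Python) =====
-- from typing import Any
--
--
-- def _compact_text(value: str, limit: int = 320, preserve_newlines: bool = False) -> str:
--     normalized = value.strip()
--     if not normalized:
--         return ""
--     if preserve_newlines:
--         lines = [" ".join(line.split()) for line in normalized.splitlines()]
--         compact = "\n".join(line for line in lines if line)
--     else:
--         compact = " ".join(normalized.split())
--     if len(compact) <= limit:
--         return compact
--     return f"{compact[: limit - 3].rstrip()}..."
--
--
-- def _collect_commands(history: Any, latest_output: Any, limit: int = 10) -> list[str]:
--     if limit <= 0:
--         return []
--     candidates: list[str] = []
--     if isinstance(latest_output, dict):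
--         candidates.extend(latest_output.get("commands", []))
--     if isinstance(history, list):
--         for attempt in reversed(history):
--             if isinstance(attempt, dict):
--                 candidates.extend(attempt.get("key_commands", []))
--     compacted = [c for c in (_compact_text(str(x), limit=320) for x in candidates) if c]
--     return list(dict.fromkeys(compacted))[:limit]
-- ===== Notes on version B (the rewrite author's own statement) =====
-- stated objective: alternative
-- what changed: Replaces A's two stateful seen-set loops with early return by building the whole candidate stream (latest_output commands, then key_commands of reversed history), compacting and filtering it, deduplicating with dict.fromkeys order, and truncating with a final [:limit] slice.
-- intended difference: For limit <= 0 with at least one non-blank candidate, A still returns the first compacted command (its 'len >= limit' check runs only after an append), while B returns the intended empty list. — e.g. on _collect_commands([], [("commands", ["ls"])], 0): A returns ["ls"], B returns []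
import Mathlib
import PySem

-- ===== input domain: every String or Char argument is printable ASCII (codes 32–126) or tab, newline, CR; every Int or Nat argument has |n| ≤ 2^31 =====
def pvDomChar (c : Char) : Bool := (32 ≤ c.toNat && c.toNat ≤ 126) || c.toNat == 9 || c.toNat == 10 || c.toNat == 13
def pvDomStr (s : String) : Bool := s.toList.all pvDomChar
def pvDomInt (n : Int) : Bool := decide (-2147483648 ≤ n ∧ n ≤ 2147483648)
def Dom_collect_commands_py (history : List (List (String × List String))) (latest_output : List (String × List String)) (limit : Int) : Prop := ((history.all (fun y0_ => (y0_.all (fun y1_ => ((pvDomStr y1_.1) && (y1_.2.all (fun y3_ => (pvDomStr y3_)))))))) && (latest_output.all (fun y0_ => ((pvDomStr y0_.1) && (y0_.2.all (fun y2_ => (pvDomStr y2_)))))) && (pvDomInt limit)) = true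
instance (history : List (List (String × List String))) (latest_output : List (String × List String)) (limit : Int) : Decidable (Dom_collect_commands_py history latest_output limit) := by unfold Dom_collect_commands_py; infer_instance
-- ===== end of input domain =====

-- B rewrites A's early-exit dedup loop as one candidate stream, compact+filter+ordered-dedup, truncated at the end ("alternative" objective).
-- Intended difference (D_): for limit ≤ 0 A still returns one command; B returns [].

-- ===== PORT A =====
-- shared helper: literal port of the module helper _compact_text (preserve_newlines is always False here)
def compact_text (value : String) (limit : Int) : String :=
  let normalized := PySem.Str.strip value
  if normalized = "" then ""
  else
    let compact := PySem.Str.join " " (PySem.Str.split₀ normalized)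
    if PySem.Str.len compact ≤ limit then compact
    else (PySem.Str.rstrip (PySem.Str.slice compact none (some (limit - 3)))) ++ "..."

-- A's inner 'for command in …' loop: Sum.inr = the early 'return commands'
def scanA (limit : Int) (commands : List String) (seen : PySem.Set String) :
    List String → (List String × PySem.Set String) ⊕ List String
  | [] => Sum.inl (commands, seen)
  | c :: rest =>
    let compact := compact_text c 320
    if compact ≠ "" && !(PySem.Set.contains seen compact) then
      let seen' := PySem.Set.add seen compact
      let commands' := commands ++ [compact]
      if ((commands'.length : Int) ≥ limit) then Sum.inr commands'
      else scanA limit commands' seen' rest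
    else scanA limit commands seen rest

-- A's 'for attempt in reversed(history)' loop (the reversal is applied by the caller)
def scanHistA (limit : Int) (commands : List String) (seen : PySem.Set String) :
    List (List (String × List String)) → List String
  | [] => commands
  | attempt :: rest =>
    match scanA limit commands seen (PySem.Dict.getD (PySem.Dict.mk attempt) "key_commands" []) with
    | Sum.inr r => r
    | Sum.inl (c', s') => scanHistA limit c' s' rest

def collect_commands_py (history : List (List (String × List String))) (latest_output : List (String × List String)) (limit : Int) : List String :=
  match scanA limit [] PySem.Set.empty (PySem.Dict.getD (PySem.Dict.mk latest_output) "commands" []) with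
  | Sum.inr r => r
  | Sum.inl (commands, seen) => scanHistA limit commands seen history.reverse

-- ===== PORT B =====
def collect_commands_py_alt (history : List (List (String × List String))) (latest_output : List (String × List String)) (limit : Int) : List String :=
  if limit ≤ 0 then []
  else
    let candidates := history.reverse.foldl
      (fun acc attempt => acc ++ PySem.Dict.getD (PySem.Dict.mk attempt) "key_commands" [])
      (PySem.Dict.getD (PySem.Dict.mk latest_output) "commands" [])
    let compacted := (candidates.map (fun c => compact_text c 320)).filter (fun c => c ≠ "")
    PySem.List.slice (PySem.List.dedup compacted) none (some limit)

-- ===== PRECONDITION & SPEC =====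
-- D_: inputs with limit ≤ 0 and at least one non-blank candidate command. There A's 'len >= limit' check
-- fires only AFTER the first append, so A returns one command although the caller asked for at most 0;
-- B returns the intended [].
def D_collect_commands_py (history : List (List (String × List String))) (latest_output : List (String × List String)) (limit : Int) : Prop :=
  limit ≤ 0 ∧
    ((∃ c ∈ PySem.Dict.getD (PySem.Dict.mk latest_output) "commands" [], PySem.Str.strip c ≠ "") ∨
     (∃ a ∈ history, ∃ c ∈ PySem.Dict.getD (PySem.Dict.mk a) "key_commands" [], PySem.Str.strip c ≠ ""))
instance (history : List (List (String × List String))) (latest_output : List (String × List String)) (limit : Int) : Decidable (D_collect_commands_py history latest_output limit) := by unfold D_collect_commands_py; infer_instance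

def Spec_collect_commands_py (history : List (List (String × List String))) (latest_output : List (String × List String)) (limit : Int) (out : List String) : Prop := ¬ D_collect_commands_py history latest_output limit → out = collect_commands_py_alt history latest_output limit
instance (history : List (List (String × List String))) (latest_output : List (String × List String)) (limit : Int) (out : List String) : Decidable (Spec_collect_commands_py history latest_output limit out) := by unfold Spec_collect_commands_py; infer_instance

def pvDiffWitness_collect_commands_py : (List (List (String × List String))) × (List (String × List String)) × Int := ([], [("commands", ["ls"])], 0)
def pvDiffWitnessOut_collect_commands_py : (List String) × (List String) := (["ls"], [])

-- ===== CLAIM (what is proved, stated in full; the proofs are below) =====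
def Claim_unchanged_collect_commands_py : Prop := ∀ (history : List (List (String × List String))) (latest_output : List (String × List String)) (limit : Int), Dom_collect_commands_py history latest_output limit → Spec_collect_commands_py history latest_output limit (collect_commands_py history latest_output limit)
def Claim_changed_collect_commands_py : Prop := Dom_collect_commands_py (pvDiffWitness_collect_commands_py.1) (pvDiffWitness_collect_commands_py.2.1) (pvDiffWitness_collect_commands_py.2.2) ∧ D_collect_commands_py (pvDiffWitness_collect_commands_py.1) (pvDiffWitness_collect_commands_py.2.1) (pvDiffWitness_collect_commands_py.2.2) ∧ collect_commands_py (pvDiffWitness_collect_commands_py.1) (pvDiffWitness_collect_commands_py.2.1) (pvDiffWitness_collect_commands_py.2.2) = pvDiffWitnessOut_collect_commands_py.1 ∧ collect_commands_py_alt (pvDiffWitness_collect_commands_py.1) (pvDiffWitness_collect_commands_py.2.1) (pvDiffWitness_collect_commands_py.2.2) = pvDiffWitnessOut_collect_commands_py.2 ∧ pvDiffWitnessOut_collect_commands_py.1 ≠ pvDiffWitnessOut_collect_commands_py.2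



def Claim_exact_collect_commands_py : Prop := ∀ (history : List (List (String × List String))) (latest_output : List (String × List String)) (limit : Int), Dom_collect_commands_py history latest_output limit → D_collect_commands_py history latest_output limit → collect_commands_py history latest_output limit ≠ collect_commands_py_alt history latest_output limit

-- ===== LEMMAS AND PROOFS =====

-- the "key_commands" candidate list of a history attempt
def keyCmds (a : List (String × List String)) : List String :=
  PySem.Dict.getD (PySem.Dict.mk a) "key_commands" []

-- the new (compacted, non-empty, not yet seen) commands that scanning `cands` with seen-set `s` yields
def fNew : List String → PySem.Set String → List String
  | [], _ => []
  | c :: r, s =>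
    let k := compact_text c 320
    if k ≠ "" && !(PySem.Set.contains s k) then k :: fNew r (s ++ [k]) else fNew r s

-- ordered dedup relative to an already-seen set
def dRel : List String → PySem.Set String → List String
  | [], _ => []
  | x :: r, s => if PySem.Set.contains s x then dRel r s else x :: dRel r (s ++ [x])

theorem fNew_cons_true (c : String) (r : List String) (s : PySem.Set String)
    (h1 : ¬ compact_text c 320 = "") (h2 : compact_text c 320 ∉ s) :
    fNew (c :: r) s = compact_text c 320 :: fNew r (s ++ [compact_text c 320]) := by
  simp [fNew, h1, h2]

theorem fNew_cons_false (c : String) (r : List String) (s : PySem.Set String)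
    (h : compact_text c 320 = "" ∨ compact_text c 320 ∈ s) :
    fNew (c :: r) s = fNew r s := by
  rcases h with h | h <;> simp [fNew, h]

theorem fNew_append (xs ys : List String) : ∀ s : PySem.Set String,
    fNew (xs ++ ys) s = fNew xs s ++ fNew ys (s ++ fNew xs s) := by
  induction xs with
  | nil => intro s; simp [fNew]
  | cons c r ih =>
    intro s
    by_cases h1 : compact_text c 320 = ""
    · rw [List.cons_append, fNew_cons_false c _ s (Or.inl h1), fNew_cons_false c r s (Or.inl h1), ih]
    · by_cases h2 : compact_text c 320 ∈ s
      · rw [List.cons_append, fNew_cons_false c _ s (Or.inr h2), fNew_cons_false c r s (Or.inr h2), ih]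
      · rw [List.cons_append, fNew_cons_true c _ s h1 h2, fNew_cons_true c r s h1 h2, ih]
        simp [List.append_assoc]

theorem scanA_char (limit : Int) (hpos : 0 < limit) : ∀ (cands commands : List String)
    (seen : PySem.Set String), commands.length < limit.toNat →
    scanA limit commands seen cands =
      if limit.toNat ≤ commands.length + (fNew cands seen).length
      then Sum.inr (commands ++ (fNew cands seen).take (limit.toNat - commands.length))
      else Sum.inl (commands ++ fNew cands seen, seen ++ fNew cands seen) := by
  intro cands
  induction cands with
  | nil =>
    intro commands seen h
    simp only [scanA, fNew, List.length_nil, Nat.add_zero, List.append_nil]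
    rw [if_neg (by omega)]
  | cons c r ih =>
    intro commands seen h
    by_cases hP : ¬ compact_text c 320 = "" ∧ compact_text c 320 ∉ seen
    · have hk : (compact_text c 320 ≠ "" && !(PySem.Set.contains seen (compact_text c 320))) = true := by
        simp [hP.1, hP.2]
      have hadd : PySem.Set.add seen (compact_text c 320) = seen ++ [compact_text c 320] := by
        simp [PySem.Set.add, hP.2]
      rw [fNew_cons_true c r seen hP.1 hP.2]
      simp only [scanA, hk, if_true, hadd]
      by_cases hret : ((commands ++ [compact_text c 320]).length : Int) ≥ limit
      · rw [if_pos hret]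
        have hlen : limit.toNat = commands.length + 1 := by
          simp only [List.length_append, List.length_cons, List.length_nil] at hret ⊢; omega
        rw [if_pos (by simp only [List.length_cons]; omega)]
        have ht : limit.toNat - commands.length = 1 := by omega
        rw [ht]
        simp
      · rw [if_neg hret]
        have hret' : ¬ limit.toNat ≤ commands.length + 1 := by
          simp only [List.length_append, List.length_cons, List.length_nil] at hret; omega
        rw [ih (commands ++ [compact_text c 320]) (seen ++ [compact_text c 320])
          (by simp only [List.length_append, List.length_cons, List.length_nil]; omega)]
        simp only [List.length_append, List.length_cons, List.length_nil, List.append_assoc,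
          List.cons_append, List.nil_append]
        by_cases h2 : limit.toNat ≤ commands.length + (1 + (fNew r (seen ++ [compact_text c 320])).length)
        · rw [if_pos (by omega), if_pos (by omega)]
          have hT : limit.toNat - commands.length = (limit.toNat - (commands.length + 1)) + 1 := by omega
          rw [hT]
          simp [List.take_succ_cons]
        · rw [if_neg (by omega), if_neg (by omega)]
    · have hor : compact_text c 320 = "" ∨ compact_text c 320 ∈ seen := by tauto
      have hk : (compact_text c 320 ≠ "" && !(PySem.Set.contains seen (compact_text c 320))) = false := by
        rcases hor with h1 | h1 <;> simp [h1]
      rw [fNew_cons_false c r seen hor]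
      simp only [scanA, hk, Bool.false_eq_true, if_false]
      exact ih commands seen h

theorem scanHistA_char (limit : Int) (hpos : 0 < limit) : ∀ (attempts : List (List (String × List String)))
    (commands : List String) (seen : PySem.Set String), commands.length < limit.toNat →
    scanHistA limit commands seen attempts =
      commands ++ (fNew (attempts.flatMap keyCmds) seen).take (limit.toNat - commands.length) := by
  intro attempts
  induction attempts with
  | nil => intro commands seen h; simp [scanHistA, fNew]
  | cons a rest ih =>
    intro commands seen h
    simp only [scanHistA, List.flatMap_cons, fNew_append]
    rw [show PySem.Dict.getD (PySem.Dict.mk a) "key_commands" [] = keyCmds a from rfl]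
    rw [scanA_char limit hpos (keyCmds a) commands seen h]
    by_cases h2 : limit.toNat ≤ commands.length + (fNew (keyCmds a) seen).length
    · rw [if_pos h2]
      rw [List.take_append_of_le_length (by omega)]
    · rw [if_neg h2]
      show scanHistA limit (commands ++ fNew (keyCmds a) seen) (seen ++ fNew (keyCmds a) seen) rest = _
      rw [ih (commands ++ fNew (keyCmds a) seen) (seen ++ fNew (keyCmds a) seen)
        (by simp only [List.length_append]; omega)]
      simp only [List.length_append, List.append_assoc]
      rw [List.take_append]
      rw [show List.take (limit.toNat - commands.length) (fNew (keyCmds a) seen) =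
        fNew (keyCmds a) seen from List.take_of_length_le (by omega)]
      rw [show limit.toNat - commands.length - (fNew (keyCmds a) seen).length =
        limit.toNat - (commands.length + (fNew (keyCmds a) seen).length) from by omega]

-- A for positive limit: the first limit new commands of the whole candidate stream
theorem collect_commands_py_pos (history : List (List (String × List String)))
    (latest_output : List (String × List String)) (limit : Int) (hpos : 0 < limit) :
    collect_commands_py history latest_output limit =
      (fNew (PySem.Dict.getD (PySem.Dict.mk latest_output) "commands" [] ++
        history.reverse.flatMap keyCmds) []).take limit.toNat := by
  unfold collect_commands_py
  rw [show (PySem.Set.empty : PySem.Set String) = [] from rfl]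
  rw [scanA_char limit hpos _ [] [] (by simp only [List.length_nil]; omega)]
  rw [fNew_append]
  simp only [List.nil_append, List.length_nil, Nat.zero_add, Nat.sub_zero]
  by_cases h2 : limit.toNat ≤ (fNew (PySem.Dict.getD (PySem.Dict.mk latest_output) "commands" []) []).length
  · rw [if_pos h2]
    show _ = _
    rw [List.take_append_of_le_length h2]
  · rw [if_neg h2]
    show scanHistA limit (fNew (PySem.Dict.getD (PySem.Dict.mk latest_output) "commands" []) [])
      (fNew (PySem.Dict.getD (PySem.Dict.mk latest_output) "commands" []) []) history.reverse = _
    rw [scanHistA_char limit hpos _ _ _ (by omega)]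
    rw [List.take_append]
    rw [show List.take limit.toNat
        (fNew (PySem.Dict.getD (PySem.Dict.mk latest_output) "commands" []) []) =
      fNew (PySem.Dict.getD (PySem.Dict.mk latest_output) "commands" []) [] from
      List.take_of_length_le (by omega)]

-- B's ordered dedup is dRel from the empty seen-set
theorem foldl_add_eq_dRel (xs : List String) : ∀ acc : PySem.Set String,
    List.foldl PySem.Set.add acc xs = acc ++ dRel xs acc := by
  induction xs with
  | nil => intro acc; simp [dRel]
  | cons x r ih =>
    intro acc
    simp only [List.foldl_cons, dRel]
    by_cases hc : PySem.Set.contains acc x = true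
    · rw [if_pos hc]
      have hmem : x ∈ acc := by simpa using hc
      have hadd : PySem.Set.add acc x = acc := by simp [PySem.Set.add, hmem]
      rw [hadd, ih]
    · rw [if_neg hc]
      have hmem : x ∉ acc := by simpa using Bool.eq_false_iff.mpr hc
      have hadd : PySem.Set.add acc x = acc ++ [x] := by simp [PySem.Set.add, hmem]
      rw [hadd, ih]
      simp

theorem dRel_cons_mem (x : String) (r : List String) (s : PySem.Set String)
    (h : x ∈ s) : dRel (x :: r) s = dRel r s := by
  have hc : PySem.Set.contains s x = true := by simpa using h
  simp only [dRel]
  rw [if_pos hc]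

theorem dRel_cons_not_mem (x : String) (r : List String) (s : PySem.Set String)
    (h : x ∉ s) : dRel (x :: r) s = x :: dRel r (s ++ [x]) := by
  simp only [dRel]
  rw [if_neg (by simpa using h)]

theorem fNew_eq_dRel (cands : List String) : ∀ s : PySem.Set String,
    fNew cands s = dRel ((cands.map (fun c => compact_text c 320)).filter (fun c => c ≠ "")) s := by
  induction cands with
  | nil => intro s; simp [fNew, dRel]
  | cons c r ih =>
    intro s
    by_cases hne : compact_text c 320 = ""
    · rw [fNew_cons_false c r s (Or.inl hne)]
      simp only [List.map_cons, List.filter_cons, hne]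
      simp only [ne_eq, not_true_eq_false, decide_false, Bool.false_eq_true, if_false]
      exact ih s
    · by_cases hc : compact_text c 320 ∈ s
      · rw [fNew_cons_false c r s (Or.inr hc)]
        simp only [List.map_cons, List.filter_cons, ne_eq, hne, not_false_eq_true, decide_true,
          if_true]
        rw [dRel_cons_mem _ _ _ hc]
        exact ih s
      · rw [fNew_cons_true c r s hne hc]
        simp only [List.map_cons, List.filter_cons, ne_eq, hne, not_false_eq_true, decide_true,
          if_true]
        rw [dRel_cons_not_mem _ _ _ hc]
        rw [ih (s ++ [compact_text c 320])]

-- B for positive limit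
theorem collect_commands_py_alt_pos (history : List (List (String × List String)))
    (latest_output : List (String × List String)) (limit : Int) (hpos : 0 < limit) :
    collect_commands_py_alt history latest_output limit =
      (fNew (PySem.Dict.getD (PySem.Dict.mk latest_output) "commands" [] ++
        history.reverse.flatMap keyCmds) []).take limit.toNat := by
  unfold collect_commands_py_alt
  rw [if_neg (by omega)]
  simp only
  rw [PySem.List.foldl_append_eq_flatMap (fun attempt => PySem.Dict.getD (PySem.Dict.mk attempt) "key_commands" [])]
  rw [PySem.List.slice_to _ (by omega)]
  rw [PySem.List.dedup_eq_ofList, PySem.Set.ofList_eq_foldl, foldl_add_eq_dRel _ []]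
  rw [List.nil_append, ← fNew_eq_dRel]
  rfl

-- a blank candidate compacts to the empty string
theorem compact_text_of_strip_eq (c : String) (h : PySem.Str.strip c = "") :
    compact_text c 320 = "" := by
  simp [compact_text, h]

theorem scanA_blank (limit : Int) : ∀ (cands commands : List String) (seen : PySem.Set String),
    (∀ c ∈ cands, compact_text c 320 = "") →
    scanA limit commands seen cands = Sum.inl (commands, seen) := by
  intro cands
  induction cands with
  | nil => intro commands seen _; simp [scanA]
  | cons c r ih =>
    intro commands seen h
    have hc : compact_text c 320 = "" := h c (by simp)
    simp only [scanA, hc]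
    simp only [ne_eq, not_true_eq_false, decide_false, Bool.false_and, Bool.false_eq_true,
      if_false]
    exact ih commands seen (fun x hx => h x (by simp [hx]))

theorem scanHistA_blank (limit : Int) : ∀ (attempts : List (List (String × List String)))
    (commands : List String) (seen : PySem.Set String),
    (∀ a ∈ attempts, ∀ c ∈ keyCmds a, compact_text c 320 = "") →
    scanHistA limit commands seen attempts = commands := by
  intro attempts
  induction attempts with
  | nil => intro commands seen _; simp [scanHistA]
  | cons a rest ih =>
    intro commands seen h
    simp only [scanHistA]
    rw [show PySem.Dict.getD (PySem.Dict.mk a) "key_commands" [] = keyCmds a from rfl]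
    rw [scanA_blank limit (keyCmds a) commands seen (h a (by simp))]
    exact ih commands seen (fun x hx => h x (by simp [hx]))

-- === tightness: a non-blank candidate compacts to a non-empty string, so A returns something for limit ≤ 0 ===

theorem split0_go_ne_nil : ∀ (s cur : List Char) (acc : List (List Char)), cur ≠ [] ∨ acc ≠ [] →
    PySem.Chars.split₀.go s cur acc ≠ [] := by
  intro s
  induction s with
  | nil =>
    intro cur acc h
    simp only [PySem.Chars.split₀.go]
    by_cases hc : cur.isEmpty
    · rw [if_pos hc]
      rcases h with h | h
      · exact absurd (List.isEmpty_iff.mp hc) h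
      · simpa using h
    · rw [if_neg hc]
      simp
  | cons c rest ih =>
    intro cur acc h
    simp only [PySem.Chars.split₀.go]
    by_cases hs : PySem.Chars.isspace c = true
    · rw [if_pos hs]
      by_cases hc : cur.isEmpty
      · rw [if_pos hc]
        apply ih
        right
        rcases h with h | h
        · exact absurd (List.isEmpty_iff.mp hc) h
        · exact h
      · rw [if_neg hc]
        apply ih
        right
        simp
    · rw [if_neg hs]
      apply ih
      left
      simp

theorem split0_go_words_ne_nil : ∀ (s cur : List Char) (acc : List (List Char)),
    (∀ w ∈ acc, w ≠ []) → ∀ w ∈ PySem.Chars.split₀.go s cur acc, w ≠ [] := by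
  intro s
  induction s with
  | nil =>
    intro cur acc hacc
    simp only [PySem.Chars.split₀.go]
    by_cases hc : cur.isEmpty
    · rw [if_pos hc]
      simpa using hacc
    · rw [if_neg hc]
      intro w hw
      simp only [List.mem_reverse, List.mem_cons] at hw
      rcases hw with hw | hw
      · subst hw
        simpa [List.isEmpty_iff] using hc
      · exact hacc w hw
  | cons c rest ih =>
    intro cur acc hacc
    simp only [PySem.Chars.split₀.go]
    by_cases hs : PySem.Chars.isspace c = true
    · rw [if_pos hs]
      by_cases hc : cur.isEmpty
      · rw [if_pos hc]
        exact ih [] acc hacc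
      · rw [if_neg hc]
        apply ih
        intro w hw
        simp only [List.mem_cons] at hw
        rcases hw with hw | hw
        · subst hw
          simpa [List.isEmpty_iff] using hc
        · exact hacc w hw
    · rw [if_neg hs]
      exact ih (c :: cur) acc hacc

theorem join_space_ne_nil (ws : List (List Char)) (hne : ws ≠ []) (hw : ∀ w ∈ ws, w ≠ []) :
    PySem.Chars.join [' '] ws ≠ [] := by
  match ws with
  | [] => exact absurd rfl hne
  | [w] =>
    simpa [PySem.Chars.join, List.intercalate] using hw w (by simp)
  | w :: w' :: rest =>
    have h1 : w ≠ [] := hw w (by simp)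
    simp [PySem.Chars.join, List.intercalate, List.intersperse, h1]

theorem dropWhile_head_false {p : Char → Bool} : ∀ (l : List Char) (d : Char) (t : List Char),
    l.dropWhile p = d :: t → p d = false := by
  intro l
  induction l with
  | nil => intro d t h; simp [List.dropWhile] at h
  | cons c rest ih =>
    intro d t h
    by_cases hc : p c = true
    · rw [List.dropWhile_cons_of_pos hc] at h
      exact ih d t h
    · rw [List.dropWhile_cons_of_neg hc] at h
      obtain ⟨rfl, -⟩ := List.cons.inj h
      exact Bool.eq_false_iff.mpr hc

theorem strip_head_nonspace (cs : List Char) (h : PySem.Chars.strip cs ≠ []) :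
    ∃ d rest, PySem.Chars.strip cs = d :: rest ∧ PySem.Chars.isspace d = false := by
  unfold PySem.Chars.strip PySem.Chars.rstrip at h ⊢
  set u := PySem.Chars.lstrip cs with hu
  have hpre : (List.dropWhile PySem.Chars.isspace u.reverse).reverse <+: u := by
    have hsuf : List.dropWhile PySem.Chars.isspace u.reverse <:+ u.reverse :=
      List.dropWhile_suffix _
    have := List.reverse_prefix.mpr hsuf
    simpa using this
  obtain ⟨d, t, hdt⟩ := List.exists_cons_of_ne_nil h
  refine ⟨d, t, hdt, ?_⟩
  obtain ⟨tail, htail⟩ := hpre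
  rw [hdt] at htail
  have hudrop : List.dropWhile PySem.Chars.isspace cs = d :: (t ++ tail) := by
    rw [hu] at htail
    unfold PySem.Chars.lstrip at htail
    simpa using htail.symm
  exact dropWhile_head_false cs d (t ++ tail) hudrop

theorem toList_ne_nil_of_ne_empty (s : String) (h : s ≠ "") : s.toList ≠ [] := by
  intro hl
  apply h
  have := congrArg String.ofList hl
  simpa using this

theorem compact_text_ne (c : String) (h : PySem.Str.strip c ≠ "") : compact_text c 320 ≠ "" := by
  have htl : (PySem.Str.strip c).toList ≠ [] := toList_ne_nil_of_ne_empty _ h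
  have htl' : PySem.Chars.strip c.toList ≠ [] := by rwa [PySem.Str.toList_strip] at htl
  obtain ⟨d, rest, hm, hd⟩ := strip_head_nonspace c.toList htl'
  have hsplit : PySem.Chars.split₀ ((PySem.Str.strip c).toList) ≠ [] := by
    rw [PySem.Str.toList_strip, hm]
    unfold PySem.Chars.split₀
    simp only [PySem.Chars.split₀.go, hd, Bool.false_eq_true, if_false]
    exact split0_go_ne_nil rest [d] [] (Or.inl (by simp))
  have hwords : ∀ w ∈ PySem.Chars.split₀ ((PySem.Str.strip c).toList), w ≠ [] := by
    unfold PySem.Chars.split₀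
    exact split0_go_words_ne_nil _ [] [] (by simp)
  have hjoin : (PySem.Str.join " " (PySem.Str.split₀ (PySem.Str.strip c))).toList ≠ [] := by
    rw [PySem.Str.toList_join, PySem.Str.split₀_map_toList]
    have hsep : " ".toList = [' '] := rfl
    rw [hsep]
    exact join_space_ne_nil _ hsplit hwords
  simp only [compact_text]
  rw [if_neg h]
  by_cases hlen : PySem.Str.len (PySem.Str.join " " (PySem.Str.split₀ (PySem.Str.strip c))) ≤ 320
  · rw [if_pos hlen]
    intro hc
    exact hjoin (by rw [hc]; rfl)
  · rw [if_neg hlen]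
    intro hc
    have := congrArg String.toList hc
    simp at this

theorem scanA_le0_inr (limit : Int) (hl : limit ≤ 0) : ∀ (cands : List String),
    (∃ c ∈ cands, compact_text c 320 ≠ "") → ∀ commands : List String,
    ∃ k, scanA limit commands [] cands = Sum.inr (commands ++ [k]) := by
  intro cands
  induction cands with
  | nil => intro hex; exact absurd hex (by simp)
  | cons c r ih =>
    intro hex commands
    by_cases hc : compact_text c 320 = ""
    · simp only [scanA, hc]
      simp only [ne_eq, not_true_eq_false, decide_false, Bool.false_and, Bool.false_eq_true,
        if_false]
      apply ih
      obtain ⟨x, hx, hxne⟩ := hex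
      rcases List.mem_cons.mp hx with hh | hh
      · subst hh; exact absurd hc hxne
      · exact ⟨x, hh, hxne⟩
    · have hcond : (compact_text c 320 ≠ "" && !(PySem.Set.contains ([] : PySem.Set String) (compact_text c 320))) = true := by
        simp [hc]
      simp only [scanA, hcond, if_true]
      rw [if_pos (by simp only [List.length_append, List.length_cons, List.length_nil]; push_cast; omega)]
      exact ⟨compact_text c 320, rfl⟩

theorem scanHistA_le0_ne (limit : Int) (hl : limit ≤ 0) : ∀ (attempts : List (List (String × List String))),
    (∃ a ∈ attempts, ∃ c ∈ keyCmds a, compact_text c 320 ≠ "") →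
    scanHistA limit [] [] attempts ≠ [] := by
  intro attempts
  induction attempts with
  | nil => intro hex; exact absurd hex (by simp)
  | cons a rest ih =>
    intro hex
    simp only [scanHistA]
    rw [show PySem.Dict.getD (PySem.Dict.mk a) "key_commands" [] = keyCmds a from rfl]
    by_cases hall : ∀ c ∈ keyCmds a, compact_text c 320 = ""
    · rw [scanA_blank limit (keyCmds a) [] [] hall]
      show scanHistA limit [] [] rest ≠ []
      apply ih
      obtain ⟨a', ha', c, hc, hne⟩ := hex
      rcases List.mem_cons.mp ha' with hh | hh
      · subst hh; exact absurd (hall c hc) hne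
      · exact ⟨a', hh, c, hc, hne⟩
    · push Not at hall
      obtain ⟨k, hk⟩ := scanA_le0_inr limit hl (keyCmds a) hall []
      rw [hk]
      show ([] ++ [k] : List String) ≠ []
      simp

-- ===== VERDICT (by name: the statement is the Claim_ definition above) =====
theorem collect_commands_py_spec : Claim_unchanged_collect_commands_py := by
  intro history latest_output limit _
  unfold Spec_collect_commands_py
  intro hnD
  by_cases hl : limit ≤ 0
  · -- ¬ D_ and limit ≤ 0: every candidate is blank, so both sides are []
    unfold D_collect_commands_py at hnD
    push Not at hnD
    have hblank := hnD hl
    have h1 : ∀ c ∈ PySem.Dict.getD (PySem.Dict.mk latest_output) "commands" [],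
        compact_text c 320 = "" :=
      fun c hc => compact_text_of_strip_eq c (hblank.1 c hc)
    have h2 : ∀ a ∈ history.reverse, ∀ c ∈ keyCmds a, compact_text c 320 = "" :=
      fun a ha c hc => compact_text_of_strip_eq c (hblank.2 a (List.mem_reverse.mp ha) c hc)
    unfold collect_commands_py
    rw [scanA_blank limit _ [] PySem.Set.empty h1]
    show scanHistA limit [] PySem.Set.empty history.reverse = _
    rw [scanHistA_blank limit history.reverse [] PySem.Set.empty h2]
    unfold collect_commands_py_alt
    rw [if_pos hl]
  · have hpos : 0 < limit := by omega
    rw [collect_commands_py_pos history latest_output limit hpos,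
      collect_commands_py_alt_pos history latest_output limit hpos]

theorem collect_commands_py_changed : Claim_changed_collect_commands_py := by
  unfold Claim_changed_collect_commands_py; decide

theorem collect_commands_py_tight : Claim_exact_collect_commands_py := by
  intro history latest_output limit _ hD
  obtain ⟨hl, hex⟩ := hD
  have hB : collect_commands_py_alt history latest_output limit = [] := by
    unfold collect_commands_py_alt
    rw [if_pos hl]
  rw [hB]
  unfold collect_commands_py
  rw [show (PySem.Set.empty : PySem.Set String) = [] from rfl]
  by_cases hall : ∀ c ∈ PySem.Dict.getD (PySem.Dict.mk latest_output) "commands" [], compact_text c 320 = ""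
  · rw [scanA_blank limit _ [] [] hall]
    show scanHistA limit [] [] history.reverse ≠ []
    rcases hex with hex | hex
    · obtain ⟨c, hc, hs⟩ := hex
      exact absurd (hall c hc) (compact_text_ne c hs)
    · obtain ⟨a, ha, c, hc, hs⟩ := hex
      exact scanHistA_le0_ne limit hl history.reverse
        ⟨a, List.mem_reverse.mpr ha, c, hc, compact_text_ne c hs⟩
  · push Not at hall
    obtain ⟨k, hk⟩ := scanA_le0_inr limit hl _ hall []
    rw [hk]
    show ([] ++ [k] : List String) ≠ []
    simp
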